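-- pv_equiv track=rewrite | github.com/nicehiro/foorbar | level1/the_cake_is_not_a_lie.py | solution
-- ===== SOURCE A (Python) =====
-- def solution(s):
--     # Your code here
--     l = len(s)
--     for i in range(1, l // 2 + 1):
--         if l % i != 0:
--             continue
--         j = 0
--         temp = s[:i]
--         while j < l:
--             if s[j:j + i] != temp:
--                 break
--             j += i
--         if j >= l:
--             return l // i
--     return 1
-- ===== SOURCE B (Python) =====
-- def solution(s):
--     l = len(s)
--     if l == 0:
--         return 1
--     return l // (s + s).find(s, 1)
-- ===== Notes on version B (the rewrite author's own statement) =====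
-- stated objective: faster
-- what changed: A tries each divisor i of len(s) and verifies it chunk by chunk with an inner while loop; B uses the doubled-string trick: (s+s).find(s,1) is the smallest rotation period of s (it always divides len(s)), so B returns len(s) // (s+s).find(s,1) with a single C-level substring search.
import Mathlib
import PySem

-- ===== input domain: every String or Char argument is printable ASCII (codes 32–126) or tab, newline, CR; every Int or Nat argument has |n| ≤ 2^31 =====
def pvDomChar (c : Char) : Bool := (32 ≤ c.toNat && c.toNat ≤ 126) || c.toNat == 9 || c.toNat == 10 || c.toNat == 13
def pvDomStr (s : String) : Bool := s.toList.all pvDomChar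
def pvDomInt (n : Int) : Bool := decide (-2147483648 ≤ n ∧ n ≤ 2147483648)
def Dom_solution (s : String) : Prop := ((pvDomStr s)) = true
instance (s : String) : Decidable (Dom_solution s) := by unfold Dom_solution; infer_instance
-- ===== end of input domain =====

-- B replaces A's divisor-by-divisor chunk checking with the doubled-string trick:
-- (s+s).find(s, 1) is the smallest rotation period of s, which always divides len(s);
-- A = B is proved for every string.


-- ===== PORT A =====
-- inner while loop: `while j < l: if s[j:j+i] != temp: break; j += i`; returns the final j.
-- fuel is only a totality guard (the loop runs at most l+1 times since i ≥ 1 for every range element).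
def solInnerA (cs temp : List Char) (i l : Int) : Nat → Int → Int
  | 0, j => j
  | fuel + 1, j =>
    if j < l then
      (if PySem.List.slice cs (some j) (some (j + i)) ≠ temp then j
       else solInnerA cs temp i l fuel (j + i))
    else j

-- outer `for i in range(1, l // 2 + 1)` with `continue` on non-divisors and early return l // i
def solOuterA (cs : List Char) (l : Int) : List Int → Int
  | [] => 1
  | i :: rest =>
    if PySem.Int.mod l i ≠ 0 then solOuterA cs l rest
    else
      let temp := PySem.List.slice cs none (some i)
      let j := solInnerA cs temp i l (cs.length + 1) 0
      if l ≤ j then PySem.Int.floordiv l i else solOuterA cs l rest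

def solution (s : String) : Int :=
  let cs := s.toList
  let l : Int := (cs.length : Int)
  solOuterA cs l (PySem.List.pyRange 1 (PySem.Int.floordiv l 2 + 1) 1)

-- ===== PORT B =====
-- `l = len(s); if l == 0: return 1; return l // (s + s).find(s, 1)`
def solution_alt (s : String) : Int :=
  let cs := s.toList
  let l : Int := (cs.length : Int)
  if l = 0 then 1
  else PySem.Int.floordiv l (PySem.Chars.findFrom (cs ++ cs) cs 1)

-- ===== PRECONDITION & SPEC =====
def Spec_solution (s : String) (out : Int) : Prop := out = solution_alt s
instance (s : String) (out : Int) : Decidable (Spec_solution s out) := by unfold Spec_solution; infer_instance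

-- ===== CLAIM (what is proved, stated in full; the proofs are below) =====
def Claim_equal_solution : Prop := ∀ (s : String), Dom_solution s → Spec_solution s (solution s)

-- ===== LEMMAS AND PROOFS =====


-- rotation period: cs rotated by p is cs again
def solPer (cs : List Char) (p : Nat) : Prop := cs.rotate p = cs

-- A's chunk condition at candidate period i (what the inner while loop checks)
def solChunks (cs : List Char) (i : Nat) : Prop :=
  ∀ m : Nat, m * i < cs.length → (cs.drop (m * i)).take i = cs.take i

-- the shift condition: cs agrees with itself shifted by i
def solShift (cs : List Char) (i : Nat) : Prop :=
  ∀ j : Nat, j + i < cs.length → cs[j + i]? = cs[j]?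

lemma solPer_add {cs : List Char} {a b : Nat} (ha : solPer cs a) (hb : solPer cs b) :
    solPer cs (a + b) := by
  unfold solPer at *
  rw [← List.rotate_rotate, ha, hb]

lemma solPer_mul {cs : List Char} {p : Nat} (hp : solPer cs p) (q : Nat) :
    solPer cs (q * p) := by
  induction q with
  | zero => simp [solPer]
  | succ q ih => have := solPer_add ih hp; simpa [Nat.succ_mul] using this

lemma solPer_mod {cs : List Char} {a p : Nat} (ha : solPer cs a) (hp : solPer cs p) :
    solPer cs (a % p) := by
  have hx : solPer cs (p * (a / p)) := by
    have := solPer_mul hp (a / p); simpa [Nat.mul_comm] using this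
  unfold solPer at *
  calc cs.rotate (a % p) = (cs.rotate (p * (a / p))).rotate (a % p) := by rw [hx]
    _ = cs.rotate (p * (a / p) + a % p) := List.rotate_rotate ..
    _ = cs.rotate a := by rw [Nat.div_add_mod]
    _ = cs := ha

-- a window of the doubled string is a rotation
lemma solDropTake_eq_rotate (cs : List Char) (p : Nat) (hp : p ≤ cs.length) :
    ((cs ++ cs).drop p).take cs.length = cs.rotate p := by
  rw [List.drop_append_of_le_length hp, List.take_append,
    List.rotate_eq_drop_append_take hp]
  have h1 : (cs.drop p).take cs.length = cs.drop p := by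
    apply List.take_of_length_le; simp
  have h2 : cs.length - (cs.drop p).length = p := by simp; omega
  rw [h1, h2]

-- cs occurs in s+s at shift p (p ≤ len) exactly when rotating by p fixes cs
lemma solPrefix_iff (cs : List Char) (p : Nat) (hp : p ≤ cs.length) :
    cs <+: (cs ++ cs).drop p ↔ cs.rotate p = cs := by
  rw [List.prefix_iff_eq_take, ← solDropTake_eq_rotate cs p hp]
  exact ⟨fun h => h.symm, fun h => h.symm⟩

-- any occurrence of cs in s+s is at a shift ≤ len
lemma solPrefix_le (cs : List Char) (p : Nat) (hn : 0 < cs.length)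
    (h : cs <+: (cs ++ cs).drop p) : p ≤ cs.length := by
  have hlen := h.length_le
  rw [List.length_drop, List.length_append] at hlen
  omega

-- the inner while loop succeeds (final j ≥ l) iff every remaining chunk equals temp
lemma solInnerA_ge_iff (cs temp : List Char) (i : Nat) (hi : 0 < i) :
    ∀ (fuel j : Nat), cs.length ≤ j + fuel →
    ((cs.length : Int) ≤ solInnerA cs temp (i : Int) (cs.length : Int) fuel (j : Int) ↔
      ∀ m : Nat, j + m * i < cs.length →
        PySem.List.slice cs (some ((j + m * i : Nat) : Int))
          (some (((j + m * i : Nat) : Int) + (i : Int))) = temp) := by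
  intro fuel
  induction fuel with
  | zero =>
    intro j hj
    constructor
    · intro _ m hm; omega
    · intro _; simp [solInnerA]; omega
  | succ fuel ih =>
    intro j hj
    by_cases hjl : j < cs.length
    · by_cases hs : PySem.List.slice cs (some (j : Int)) (some ((j : Int) + (i : Int))) = temp
      · have hrec : solInnerA cs temp (i : Int) (cs.length : Int) (fuel + 1) (j : Int) =
            solInnerA cs temp (i : Int) (cs.length : Int) fuel ((j + i : Nat) : Int) := by
          simp only [solInnerA]
          rw [if_pos (by exact_mod_cast hjl), if_neg (by simpa using hs)]
          push_cast; ring_nf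
        rw [hrec, ih (j + i) (by omega)]
        constructor
        · intro h m hm
          cases m with
          | zero => simpa using hs
          | succ m =>
            have := h m (by have e : (m + 1) * i = m * i + i := by ring
                            omega)
            have hidx : j + i + m * i = j + (m + 1) * i := by ring
            rw [hidx] at this; exact this
        · intro h m hm
          have := h (m + 1) (by have e : (m + 1) * i = m * i + i := by ring
                                omega)
          have hidx : j + (m + 1) * i = j + i + m * i := by ring
          rw [hidx] at this; exact this
      · have hres : solInnerA cs temp (i : Int) (cs.length : Int) (fuel + 1) (j : Int) = (j : Int) := by
          simp only [solInnerA]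
          rw [if_pos (by exact_mod_cast hjl), if_pos (by simpa using hs)]
        rw [hres]
        constructor
        · intro h; omega
        · intro h
          exfalso; apply hs
          have := h 0 (by omega)
          simpa using this
    · have hres : solInnerA cs temp (i : Int) (cs.length : Int) (fuel + 1) (j : Int) = (j : Int) := by
        simp only [solInnerA]
        rw [if_neg (by exact_mod_cast hjl)]
      rw [hres]
      constructor
      · intro _ m hm; omega
      · intro _; omega

-- chunk condition implies shift condition
lemma solChunks_shift {cs : List Char} {i : Nat} (hi : 0 < i)
    (h : solChunks cs i) : solShift cs i := by
  intro j hj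
  set m := j / i with hm
  set r := j % i with hr
  have hri : r < i := Nat.mod_lt _ hi
  have hjd : m * i + r = j := by rw [hm, hr, Nat.mul_comm]; exact Nat.div_add_mod j i
  have hc1 : (cs.drop (m * i)).take i = cs.take i := h m (by omega)
  have hc2 : (cs.drop ((m + 1) * i)).take i = cs.take i := h (m + 1) (by
    have : (m + 1) * i = m * i + i := by ring
    omega)
  have e1 : cs[m * i + r]? = cs[r]? := by
    have := congrArg (fun xs => xs[r]?) hc1
    simpa [List.getElem?_take_of_lt hri, List.getElem?_drop] using this
  have e2 : cs[(m + 1) * i + r]? = cs[r]? := by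
    have := congrArg (fun xs => xs[r]?) hc2
    simpa [List.getElem?_take_of_lt hri, List.getElem?_drop] using this
  have hidx : j + i = (m + 1) * i + r := by have e : (m + 1) * i = m * i + i := by ring
                                            omega
  have hidx2 : j = m * i + r := by omega
  rw [hidx, hidx2, e1, e2]

-- iterating the shift
lemma solShift_pointwise {cs : List Char} {i : Nat} (hsh : solShift cs i) :
    ∀ m k : Nat, k < i → m * i + k < cs.length → cs[m * i + k]? = cs[k]? := by
  intro m
  induction m with
  | zero => intro k _ _; simp
  | succ m ih =>
    intro k hk hlt
    have hstep : cs[m * i + k + i]? = cs[m * i + k]? := hsh (m * i + k) (by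
      have : (m + 1) * i = m * i + i := by ring
      omega)
    have hidx : (m + 1) * i + k = m * i + k + i := by ring
    rw [hidx, hstep, ih k hk (by omega)]

-- shift + divisibility gives the chunk condition
lemma solShift_chunks {cs : List Char} {i : Nat} (hdvd : i ∣ cs.length)
    (hsh : solShift cs i) : solChunks cs i := by
  intro m hm
  obtain ⟨t, ht⟩ := hdvd
  have hfull : m * i + i ≤ cs.length := by
    have hmt : m < t := by
      have h1 : i * m < i * t := by
        have h0 := hm
        rw [ht] at h0
        calc i * m = m * i := Nat.mul_comm i m
          _ < i * t := h0
      exact Nat.lt_of_mul_lt_mul_left h1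
    have h2 : i * (m + 1) ≤ i * t := Nat.mul_le_mul_left i hmt
    have h3 : i * (m + 1) = m * i + i := by ring
    omega
  apply List.ext_getElem?_iff.mpr
  intro k
  by_cases hk : k < i
  · rw [List.getElem?_take_of_lt hk, List.getElem?_take_of_lt hk, List.getElem?_drop]
    exact solShift_pointwise hsh m k hk (by omega)
  · rw [Nat.not_lt] at hk
    rw [List.getElem?_eq_none_iff.mpr (by simp; omega),
      List.getElem?_eq_none_iff.mpr (by simp; omega)]

-- for a positive divisor i of the length, the chunk condition is exactly "rotation by i is the identity"
lemma solPer_iff_chunks {cs : List Char} {i : Nat} (hi : 0 < i) (hdvd : i ∣ cs.length) :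
    solPer cs i ↔ solChunks cs i := by
  rcases Nat.eq_zero_or_pos cs.length with hl | hl
  · constructor
    · intro _ m hm; omega
    · intro _
      unfold solPer
      have : cs = [] := List.eq_nil_of_length_eq_zero hl
      simp [this]
  · have hil : i ≤ cs.length := Nat.le_of_dvd hl hdvd
    obtain ⟨t, ht⟩ := hdvd
    have ht1 : 1 ≤ t := by
      rcases Nat.eq_zero_or_pos t with h0 | h1
      · rw [h0, Nat.mul_zero] at ht; omega
      · exact h1
    constructor
    · -- rotation fixed → shift → chunks
      intro hper
      apply solShift_chunks ⟨t, ht⟩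
      intro j hj
      have happ : cs.drop i ++ cs.take i = cs := by
        rw [← List.rotate_eq_drop_append_take hil]; exact hper
      have := congrArg (fun xs => xs[j]?) happ
      simp only at this
      rw [List.getElem?_append_left (by simp; omega), List.getElem?_drop] at this
      rw [Nat.add_comm j i, ← this]
    · -- chunks → rotation fixed
      intro hch
      have hsh : solShift cs i := solChunks_shift hi hch
      unfold solPer
      rw [List.rotate_eq_drop_append_take hil]
      apply List.ext_getElem?_iff.mpr
      intro k
      by_cases hk1 : k < cs.length - i
      · rw [List.getElem?_append_left (by simp; omega), List.getElem?_drop,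
          Nat.add_comm i k]
        exact hsh k (by omega)
      · by_cases hk2 : k < cs.length
        · rw [List.getElem?_append_right (by simp; omega)]
          have hlen : (cs.drop i).length = cs.length - i := by simp
          rw [hlen, List.getElem?_take_of_lt (by omega)]
          have hkt : k - (cs.length - i) < i := by omega
          have := solShift_pointwise hsh (t - 1) (k - (cs.length - i)) hkt (by
            have : (t - 1) * i = cs.length - i := by
              rw [ht, Nat.sub_mul, Nat.one_mul, Nat.mul_comm]
            omega)
          have hidx : (t - 1) * i + (k - (cs.length - i)) = k := by
            have h1 : (t - 1) * i = cs.length - i := by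
              rw [ht, Nat.sub_mul, Nat.one_mul, Nat.mul_comm]
            omega
          rw [hidx] at this
          exact this.symm
        · rw [List.getElem?_eq_none_iff.mpr (by simp; omega),
            List.getElem?_eq_none_iff.mpr (by omega)]

-- A's full success condition at candidate i : Int
def solCondA (cs : List Char) (i : Int) : Prop :=
  PySem.Int.mod (cs.length : Int) i = 0 ∧
    (cs.length : Int) ≤ solInnerA cs (PySem.List.slice cs none (some i)) i (cs.length : Int)
      (cs.length + 1) 0

-- outer loop A: no candidate in [a, b) succeeds → falls through to 1
lemma solOuterA_none (cs : List Char) (a b : Int)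
    (h : ∀ i : Int, a ≤ i → i < b → ¬ solCondA cs i) :
    solOuterA cs (cs.length : Int) (PySem.List.pyRange a b 1) = 1 := by
  by_cases hab : b ≤ a
  · rw [PySem.List.pyRange_one_eq_nil hab]; rfl
  · rw [Int.not_le] at hab
    have hk : (b - a).toNat ≠ 0 := by omega
    obtain ⟨n, hn⟩ : ∃ n, (b - a).toNat = n := ⟨_, rfl⟩
    induction n generalizing a with
    | zero => omega
    | succ n ih =>
      rw [PySem.List.pyRange_one_cons hab]
      have hnc := h a le_rfl hab
      simp only [solOuterA]
      by_cases hmod : PySem.Int.mod (cs.length : Int) a = 0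
      · rw [if_neg (by simpa using hmod)]
        have hinner : ¬ ((cs.length : Int) ≤ solInnerA cs (PySem.List.slice cs none (some a)) a
            (cs.length : Int) (cs.length + 1) 0) := by
          intro hc; exact hnc ⟨hmod, hc⟩
        rw [if_neg hinner]
        by_cases hab2 : a + 1 < b
        · exact ih (a + 1) (fun i h1 h2 => h i (by omega) h2) hab2 (by omega) (by omega)
        · rw [PySem.List.pyRange_one_eq_nil (by omega)]; rfl
      · rw [if_pos (by simpa using hmod)]
        by_cases hab2 : a + 1 < b
        · exact ih (a + 1) (fun i h1 h2 => h i (by omega) h2) hab2 (by omega) (by omega)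
        · rw [PySem.List.pyRange_one_eq_nil (by omega)]; rfl

-- outer loop A: first succeeding candidate i0 returns l // i0
lemma solOuterA_hit (cs : List Char) (a b i0 : Int) (ha : a ≤ i0) (hb : i0 < b)
    (hc : solCondA cs i0) (hmiss : ∀ i : Int, a ≤ i → i < i0 → ¬ solCondA cs i) :
    solOuterA cs (cs.length : Int) (PySem.List.pyRange a b 1) =
      PySem.Int.floordiv (cs.length : Int) i0 := by
  obtain ⟨n, hn⟩ : ∃ n, (i0 - a).toNat = n := ⟨_, rfl⟩
  induction n generalizing a with
  | zero =>
    have haeq : a = i0 := by omega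
    subst haeq
    rw [PySem.List.pyRange_one_cons (by omega)]
    simp only [solOuterA]
    rw [if_neg (by simpa using hc.1), if_pos hc.2]
  | succ n ih =>
    have hai : a < i0 := by omega
    rw [PySem.List.pyRange_one_cons (by omega)]
    have hnc := hmiss a le_rfl hai
    simp only [solOuterA]
    by_cases hmod : PySem.Int.mod (cs.length : Int) a = 0
    · rw [if_neg (by simpa using hmod)]
      have hinner : ¬ ((cs.length : Int) ≤ solInnerA cs (PySem.List.slice cs none (some a)) a
          (cs.length : Int) (cs.length + 1) 0) := by
        intro hcc; exact hnc ⟨hmod, hcc⟩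
      rw [if_neg hinner]
      exact ih (a + 1) (by omega) (fun i h1 h2 => hmiss i (by omega) h2) (by omega)
    · rw [if_pos (by simpa using hmod)]
      exact ih (a + 1) (by omega) (fun i h1 h2 => hmiss i (by omega) h2) (by omega)

-- solCondA at a positive candidate is exactly "i divides l and rotation by i fixes cs"
lemma solCondA_iff (cs : List Char) (i : Nat) (hi : 0 < i) :
    solCondA cs (i : Int) ↔ (i ∣ cs.length ∧ solPer cs i) := by
  unfold solCondA
  have hmod : PySem.Int.mod (cs.length : Int) (i : Int) = 0 ↔ i ∣ cs.length := by
    rw [PySem.Int.mod_eq_zero_iff_dvd]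
    exact_mod_cast Int.natCast_dvd_natCast
  constructor
  · rintro ⟨h1, h2⟩
    have hdvd : i ∣ cs.length := hmod.mp h1
    refine ⟨hdvd, ?_⟩
    rw [solPer_iff_chunks hi hdvd]
    have := (solInnerA_ge_iff cs (PySem.List.slice cs none (some (i : Int))) i hi
      (cs.length + 1) 0 (by omega)).mp (by exact_mod_cast h2)
    intro m hm
    have hsl := this m (by omega)
    rw [PySem.List.slice_to_natCast] at hsl
    have : PySem.List.slice cs (some ((0 + m * i : Nat) : Int))
        (some (((0 + m * i : Nat) : Int) + (i : Int))) = (cs.drop (m * i)).take i := by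
      have hcast : ((0 + m * i : Nat) : Int) + (i : Int) = ((m * i + i : Nat) : Int) := by
        push_cast; ring
      rw [hcast]
      have := PySem.List.slice_natCast (xs := cs) (a := m * i) (b := m * i + i)
      simp only [Nat.zero_add]
      rw [show ((m * i : Nat) : Int) = ((m * i : Nat) : Int) from rfl]
      exact_mod_cast this.trans (by rw [Nat.add_sub_cancel_left])
    rw [← this, hsl]
  · rintro ⟨hdvd, hper⟩
    refine ⟨hmod.mpr hdvd, ?_⟩
    have hch := (solPer_iff_chunks hi hdvd).mp hper
    have hiff := solInnerA_ge_iff cs (PySem.List.slice cs none (some (i : Int))) i hi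
      (cs.length + 1) 0 (by omega)
    have : ((cs.length : Int)) ≤ solInnerA cs (PySem.List.slice cs none (some (i : Int)))
        (i : Int) (cs.length : Int) (cs.length + 1) ((0 : Nat) : Int) := by
      rw [hiff]
      intro m hm
      rw [PySem.List.slice_to_natCast]
      have hcast : ((0 + m * i : Nat) : Int) + (i : Int) = ((m * i + i : Nat) : Int) := by
        push_cast; ring
      rw [hcast]
      have hs := PySem.List.slice_natCast (xs := cs) (a := 0 + m * i) (b := m * i + i)
      rw [show ((0 + m * i : Nat)) = (m * i : Nat) from by omega] at hs ⊢
      rw [hs, Nat.add_sub_cancel_left]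
      exact hch m (by omega)
    exact_mod_cast this

-- main equality on the list level
lemma solMain (cs : List Char) :
    solOuterA cs (cs.length : Int)
      (PySem.List.pyRange 1 (PySem.Int.floordiv (cs.length : Int) 2 + 1) 1) =
    (if (cs.length : Int) = 0 then 1
     else PySem.Int.floordiv (cs.length : Int) (PySem.Chars.findFrom (cs ++ cs) cs 1)) := by
  have hfd : PySem.Int.floordiv (cs.length : Int) 2 = ((cs.length / 2 : Nat) : Int) := by
    exact_mod_cast PySem.Int.floordiv_natCast cs.length 2
  rcases Nat.eq_zero_or_pos cs.length with hn | hn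
  · rw [if_pos (by exact_mod_cast hn)]
    have h1 : PySem.List.pyRange 1 (PySem.Int.floordiv (cs.length : Int) 2 + 1) 1 = [] := by
      apply PySem.List.pyRange_one_eq_nil; rw [hfd, hn]; norm_num
    rw [h1]; rfl
  · rw [if_neg (by exact_mod_cast Nat.pos_iff_ne_zero.mp hn)]
    -- smallest positive rotation period
    have hPex : ∃ p, 0 < p ∧ cs.rotate p = cs := ⟨cs.length, hn, List.rotate_length cs⟩
    set p0 := Nat.find hPex with hp0def
    have hp0 : 0 < p0 ∧ cs.rotate p0 = cs := Nat.find_spec hPex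
    have hmin : ∀ q, q < p0 → ¬ (0 < q ∧ cs.rotate q = cs) := fun q hq => Nat.find_min hPex hq
    have hdvdany : ∀ a : Nat, cs.rotate a = cs → p0 ∣ a := by
      intro a ha
      have hr : cs.rotate (a % p0) = cs := solPer_mod ha hp0.2
      rcases Nat.eq_zero_or_pos (a % p0) with h0 | hpos
      · exact Nat.dvd_of_mod_eq_zero h0
      · exact absurd ⟨hpos, hr⟩ (hmin _ (Nat.mod_lt a hp0.1))
    have hdl : p0 ∣ cs.length := hdvdany cs.length (List.rotate_length cs)
    have hp0n : p0 ≤ cs.length := Nat.le_of_dvd hn hdl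
    -- the find in the doubled string returns exactly p0
    have hk1 : (1 : Nat) ≤ (cs ++ cs).length := by simp; omega
    have hiff := PySem.Chars.findFrom_natCast_eq_neg_one_iff (cs ++ cs) cs 1 hk1
    rw [Nat.cast_one] at hiff
    have hne : PySem.Chars.findFrom (cs ++ cs) cs 1 ≠ -1 := by
      rw [ne_eq, hiff]
      intro hno
      apply hno
      rw [List.drop_append_of_le_length (by omega)]
      exact (List.suffix_append _ _).isInfix
    have hspec := PySem.Chars.findFrom_natCast_spec (cs ++ cs) cs 1 hk1
      (by rw [Nat.cast_one]; exact hne)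
    rw [Nat.cast_one] at hspec
    obtain ⟨hf1, hfpre, hfmin⟩ := hspec
    have hfle : (PySem.Chars.findFrom (cs ++ cs) cs 1).toNat ≤ cs.length :=
      solPrefix_le cs _ hn hfpre
    have hrotf : cs.rotate (PySem.Chars.findFrom (cs ++ cs) cs 1).toNat = cs :=
      (solPrefix_iff cs _ hfle).mp hfpre
    have hp0f : p0 ≤ (PySem.Chars.findFrom (cs ++ cs) cs 1).toNat :=
      Nat.find_le ⟨by omega, hrotf⟩
    have hfeq : PySem.Chars.findFrom (cs ++ cs) cs 1 = (p0 : Int) := by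
      rcases Nat.lt_or_ge p0 (PySem.Chars.findFrom (cs ++ cs) cs 1).toNat with hlt | hge
      · exact absurd ((solPrefix_iff cs p0 hp0n).mpr hp0.2) (hfmin p0 hp0.1 hlt)
      · omega
    rw [hfeq]
    -- A's side
    rcases Nat.lt_or_ge cs.length (2 * p0) with hcase | hcase
    · -- p0 = cs.length; A finds no divisor ≤ l/2, B returns l // l = 1
      have hp0eq : p0 = cs.length := by
        obtain ⟨k, hk⟩ := hdl
        rcases k with _ | _ | k
        · omega
        · omega
        · exfalso
          have : p0 * 2 ≤ p0 * (k + 1 + 1) := Nat.mul_le_mul_left p0 (by omega)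
          omega
      have hA : solOuterA cs (cs.length : Int)
          (PySem.List.pyRange 1 (PySem.Int.floordiv (cs.length : Int) 2 + 1) 1) = 1 := by
        apply solOuterA_none
        intro i h1 h2 hcond
        rw [hfd] at h2
        have hineq : i = ((i.toNat : Nat) : Int) := by omega
        rw [hineq] at hcond
        have hrot := ((solCondA_iff cs i.toNat (by omega)).mp hcond).2
        exact hmin i.toNat (by omega) ⟨by omega, hrot⟩
      rw [hA, hp0eq]
      rw [show PySem.Int.floordiv (cs.length : Int) (cs.length : Int) =
          ((cs.length / cs.length : Nat) : Int) from
        by exact_mod_cast PySem.Int.floordiv_natCast cs.length cs.length]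
      rw [Nat.div_self hn]
      rfl
    · -- p0 ≤ l/2; A hits p0 first
      have hp0half : p0 ≤ cs.length / 2 := by omega
      apply solOuterA_hit cs 1 (PySem.Int.floordiv (cs.length : Int) 2 + 1) (p0 : Int)
        (by exact_mod_cast hp0.1)
        (by rw [hfd]; exact_mod_cast Nat.lt_succ_of_le hp0half)
      · exact (solCondA_iff cs p0 hp0.1).mpr ⟨hdl, hp0.2⟩
      · intro i h1 h2 hcond
        have hineq : i = ((i.toNat : Nat) : Int) := by omega
        rw [hineq] at hcond
        have hrot := ((solCondA_iff cs i.toNat (by omega)).mp hcond).2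
        exact hmin i.toNat (by omega) ⟨by omega, hrot⟩

-- ===== VERDICT (by name: the statement is the Claim_ definition above) =====
theorem solution_spec : Claim_equal_solution := by
  intro s _
  unfold Spec_solution solution solution_alt
  exact solMain s.toList
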